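-- pv_equiv track=rewrite | github.com/LSG-hub/API_AFFINITY | api_similarity_analyzer.py | _analyze_crud_operations
-- ===== SOURCE A (Python) =====
-- def _analyze_crud_operations(paths):
--     """Analyze CRUD operation patterns."""
--     crud_patterns = {'create': 0, 'read': 0, 'update': 0, 'delete': 0}
--
--     for path_info in paths.values():
--         methods = path_info.get('methods', [])
--         if 'POST' in methods:
--             crud_patterns['create'] += 1
--         if 'GET' in methods:
--             crud_patterns['read'] += 1
--         if 'PUT' in methods or 'PATCH' in methods:
--             crud_patterns['update'] += 1
--         if 'DELETE' in methods:
--             crud_patterns['delete'] += 1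
--
--     return crud_patterns
-- ===== SOURCE B (Python) =====
-- def _analyze_crud_operations(paths):
--     """Analyze CRUD operation patterns (table-driven per-category scan)."""
--     table = [('create', ['POST']),
--              ('read', ['GET']),
--              ('update', ['PUT', 'PATCH']),
--              ('delete', ['DELETE'])]
--     return {key: sum(1 for info in paths.values()
--                      if any(m in info.get('methods', []) for m in triggers))
--             for key, triggers in table}
-- ===== Notes on version B (the rewrite author's own statement) =====
-- stated objective: alternative
-- what changed: Replaces A's single pass with four hard-coded conditional counters by a data-driven dict comprehension over a fixed CRUD->trigger-methods table, scanning the paths once per category with any().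
import Mathlib
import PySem

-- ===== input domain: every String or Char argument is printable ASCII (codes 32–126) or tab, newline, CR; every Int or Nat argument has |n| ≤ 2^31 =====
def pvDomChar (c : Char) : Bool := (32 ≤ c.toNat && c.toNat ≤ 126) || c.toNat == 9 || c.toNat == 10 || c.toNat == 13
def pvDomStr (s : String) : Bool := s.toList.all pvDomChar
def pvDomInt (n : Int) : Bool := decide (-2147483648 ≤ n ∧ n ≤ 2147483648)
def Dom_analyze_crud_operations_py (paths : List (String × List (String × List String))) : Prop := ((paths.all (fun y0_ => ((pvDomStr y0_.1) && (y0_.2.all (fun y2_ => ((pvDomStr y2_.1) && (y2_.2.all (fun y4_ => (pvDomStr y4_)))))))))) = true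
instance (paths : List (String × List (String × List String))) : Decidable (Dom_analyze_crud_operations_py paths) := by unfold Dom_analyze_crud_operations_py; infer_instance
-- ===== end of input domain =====

-- B replaces A's single pass with four inline counters by a table-driven
-- per-category scan (dict comprehension over a CRUD->triggers table); same cost, alternative decomposition.

-- ===== PORT A =====
-- path_info.get('methods', []) : first-match association-list lookup
def pvMethods (info : List (String × List String)) : List String :=
  (info.lookup "methods").getD []

def analyze_crud_operations_py (paths : List (String × List (String × List String))) : List (String × Int) :=
  (paths.foldl (fun d pi =>
      let methods := pvMethods pi.2
      let d := if methods.contains "POST" then d.modify "create" 0 (· + 1) else d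
      let d := if methods.contains "GET" then d.modify "read" 0 (· + 1) else d
      let d := if methods.contains "PUT" || methods.contains "PATCH" then d.modify "update" 0 (· + 1) else d
      if methods.contains "DELETE" then d.modify "delete" 0 (· + 1) else d)
    (PySem.Dict.mk [("create", (0:Int)), ("read", 0), ("update", 0), ("delete", 0)])).items

-- ===== PORT B =====
-- sum(1 for info in paths.values() if any(m in info.get('methods',[]) for m in triggers))
def pvCrudCount (paths : List (String × List (String × List String))) (triggers : List String) : Int :=
  paths.foldl (fun acc pi =>
    if triggers.any (fun m => ((pi.2.lookup "methods").getD []).contains m) then acc + 1 else acc) 0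

def analyze_crud_operations_py_alt (paths : List (String × List (String × List String))) : List (String × Int) :=
  [("create", ["POST"]), ("read", ["GET"]), ("update", ["PUT", "PATCH"]), ("delete", ["DELETE"])].map
    (fun kt => (kt.1, pvCrudCount paths kt.2))

-- ===== PRECONDITION & SPEC =====
def Spec_analyze_crud_operations_py (paths : List (String × List (String × List String))) (out : List (String × Int)) : Prop := out = analyze_crud_operations_py_alt paths
instance (paths : List (String × List (String × List String))) (out : List (String × Int)) : Decidable (Spec_analyze_crud_operations_py paths out) := by unfold Spec_analyze_crud_operations_py; infer_instance

-- ===== CLAIM (what is proved, stated in full; the proofs are below) =====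
def Claim_equal_analyze_crud_operations_py : Prop := ∀ (paths : List (String × List (String × List String))), Dom_analyze_crud_operations_py paths → Spec_analyze_crud_operations_py paths (analyze_crud_operations_py paths)

-- ===== LEMMAS AND PROOFS =====

-- shift lemma for counting folds
theorem pv_count_shift {α : Type} (P : α → Bool) (l : List α) (n : Int) :
    l.foldl (fun acc x => if P x then acc + 1 else acc) n
      = n + l.foldl (fun acc x => if P x then acc + 1 else acc) 0 := by
  induction l generalizing n with
  | nil => simp
  | cons x xs ih =>
    simp only [List.foldl_cons]
    rw [ih, ih (if P x then 0 + 1 else 0)]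
    split <;> ring

theorem pvCrudCount_cons (p : String × List (String × List String))
    (ps : List (String × List (String × List String))) (triggers : List String) :
    pvCrudCount (p :: ps) triggers
      = (if triggers.any (fun m => ((p.2.lookup "methods").getD []).contains m) then 1 else 0)
        + pvCrudCount ps triggers := by
  unfold pvCrudCount
  simp only [List.foldl_cons]
  rw [pv_count_shift]
  split <;> simp

theorem pv_fold_items (paths : List (String × List (String × List String))) :
    ∀ (a b c d : Int),
    (paths.foldl (fun d' pi =>
        let methods := pvMethods pi.2
        let d' := if methods.contains "POST" then d'.modify "create" 0 (· + 1) else d'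
        let d' := if methods.contains "GET" then d'.modify "read" 0 (· + 1) else d'
        let d' := if methods.contains "PUT" || methods.contains "PATCH" then d'.modify "update" 0 (· + 1) else d'
        if methods.contains "DELETE" then d'.modify "delete" 0 (· + 1) else d')
      (PySem.Dict.mk [("create", a), ("read", b), ("update", c), ("delete", d)])).items
      = [("create", a + pvCrudCount paths ["POST"]),
         ("read", b + pvCrudCount paths ["GET"]),
         ("update", c + pvCrudCount paths ["PUT", "PATCH"]),
         ("delete", d + pvCrudCount paths ["DELETE"])] := by
  induction paths with
  | nil => intro a b c d; simp [pvCrudCount]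
  | cons p ps ih =>
    intro a b c d
    simp only [List.foldl_cons]
    have hstep : ∀ (a b c d : Int),
        (let methods := pvMethods p.2
         let d' := (PySem.Dict.mk [("create", a), ("read", b), ("update", c), ("delete", d)])
         let d' := if methods.contains "POST" then d'.modify "create" 0 (· + 1) else d'
         let d' := if methods.contains "GET" then d'.modify "read" 0 (· + 1) else d'
         let d' := if methods.contains "PUT" || methods.contains "PATCH" then d'.modify "update" 0 (· + 1) else d'
         if methods.contains "DELETE" then d'.modify "delete" 0 (· + 1) else d')
        = PySem.Dict.mk
            [("create", a + (if (pvMethods p.2).contains "POST" then 1 else 0)),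
             ("read", b + (if (pvMethods p.2).contains "GET" then 1 else 0)),
             ("update", c + (if (pvMethods p.2).contains "PUT" || (pvMethods p.2).contains "PATCH" then 1 else 0)),
             ("delete", d + (if (pvMethods p.2).contains "DELETE" then 1 else 0))] := by
      intro a b c d
      simp only []
      split_ifs <;>
        simp [PySem.Dict.modify, PySem.Dict.insert, PySem.Dict.getD, PySem.Dict.get?]
    rw [hstep, ih]
    rw [pvCrudCount_cons, pvCrudCount_cons, pvCrudCount_cons, pvCrudCount_cons]
    simp [pvMethods]
    constructor
    · split <;> ring
    constructor
    · split <;> ring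
    constructor
    · split <;> ring
    · split <;> ring

-- ===== VERDICT (by name: the statement is the Claim_ definition above) =====
theorem analyze_crud_operations_py_spec : Claim_equal_analyze_crud_operations_py := by
  intro paths _
  unfold Spec_analyze_crud_operations_py analyze_crud_operations_py analyze_crud_operations_py_alt
  rw [pv_fold_items]
  simp
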